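-- pv_equiv track=rewrite | github.com/gleesonb-aurea/changelog-generator | api_wrapper.py | create_email_summary
-- ===== SOURCE A (Python) =====
-- def create_email_summary(changelog: str) -> str:
--     """Create a concise 2-3 paragraph summary for email distribution."""
--     lines = changelog.split('\n')
--
--     # Extract key sections
--     added_items = []
--     fixed_items = []
--     changed_items = []
--
--     current_section = None
--     for line in lines:
--         line = line.strip()
--         if line.startswith('### Added'):
--             current_section = 'added'
--         elif line.startswith('### Fixed'):
--             current_section = 'fixed'
--         elif line.startswith('### Changed'):
--             current_section = 'changed'
--         elif line.startswith('###'):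
--             current_section = None
--         elif line.startswith('- ') and current_section:
--             item = line[2:].strip()
--             if current_section == 'added':
--                 added_items.append(item)
--             elif current_section == 'fixed':
--                 fixed_items.append(item)
--             elif current_section == 'changed':
--                 changed_items.append(item)
--
--     # Create summary paragraphs
--     summary_parts = []
--
--     if added_items:
--         summary_parts.append(f"This month we've introduced {len(added_items)} new features and improvements to make CloudFix even more powerful for AWS cost optimization. Key additions include {', '.join(added_items[:2])}{'...' if len(added_items) > 2 else ''}.")
--
--     if fixed_items or changed_items:
--         improvements_count = len(fixed_items) + len(changed_items)
--         summary_parts.append(f"We've also made {improvements_count} enhancements and bug fixes based on your feedback, improving overall stability and performance.")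
--
--     summary_parts.append("These updates are automatically available in your CloudFix dashboard. Check out the full changelog below for complete details.")
--
--     return ' '.join(summary_parts)
-- ===== SOURCE B (Python) =====
-- def create_email_summary(changelog: str) -> str:
--     """Create a concise 2-3 paragraph summary for email distribution."""
--     lines = [l.strip() for l in changelog.split('\n')]
--
--     # Segment-based extraction: walk header-delimited blocks instead of a
--     # per-line state machine.
--     added_items = []
--     fixed_items = []
--     changed_items = []
--     rest = lines
--     while rest:
--         header, rest = rest[0], rest[1:]
--         body = []
--         while rest and not rest[0].startswith('###'):
--             body.append(rest[0])
--             rest = rest[1:]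
--         items = [l[2:].strip() for l in body if l.startswith('- ')]
--         if header.startswith('### Added'):
--             added_items += items
--         elif header.startswith('### Fixed'):
--             fixed_items += items
--         elif header.startswith('### Changed'):
--             changed_items += items
--
--     # Build the summary back-to-front by prefixing paragraphs.
--     out = "These updates are automatically available in your CloudFix dashboard. Check out the full changelog below for complete details."
--     if fixed_items or changed_items:
--         out = f"We've also made {len(fixed_items) + len(changed_items)} enhancements and bug fixes based on your feedback, improving overall stability and performance." + " " + out
--     if added_items:
--         out = f"This month we've introduced {len(added_items)} new features and improvements to make CloudFix even more powerful for AWS cost optimization. Key additions include {', '.join(added_items[:2])}{'...' if len(added_items) > 2 else ''}." + " " + out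
--     return out
-- ===== Notes on version B (the rewrite author's own statement) =====
-- stated objective: alternative
-- what changed: Replaces the per-line current-section state machine with a segment decomposition (split the line list into header-delimited blocks, classify each block's header and collect its '- ' items), and builds the final summary back-to-front by prefixing paragraph strings instead of joining a parts list.
import Mathlib
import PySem

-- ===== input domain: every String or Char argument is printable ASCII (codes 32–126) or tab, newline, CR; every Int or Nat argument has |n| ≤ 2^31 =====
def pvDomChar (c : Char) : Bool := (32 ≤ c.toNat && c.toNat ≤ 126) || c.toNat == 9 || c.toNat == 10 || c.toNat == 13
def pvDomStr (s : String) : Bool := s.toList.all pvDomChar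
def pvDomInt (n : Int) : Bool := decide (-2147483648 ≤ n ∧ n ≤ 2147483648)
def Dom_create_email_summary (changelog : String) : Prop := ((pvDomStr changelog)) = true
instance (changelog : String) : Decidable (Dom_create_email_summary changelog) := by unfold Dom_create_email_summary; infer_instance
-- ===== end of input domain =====

-- B replaces A's per-line current-section state machine by a segment decomposition into
-- header-delimited blocks and builds the summary back-to-front by prefixing paragraphs
-- (objective: alternative decomposition, same cost).

-- the marker literals both Pythons test with startswith
def pvHdrAdded : List Char := "### Added".toList
def pvHdrFixed : List Char := "### Fixed".toList
def pvHdrChanged : List Char := "### Changed".toList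
def pvHdr : List Char := "###".toList
def pvDash : List Char := "- ".toList

-- ===== PORT A =====
-- one step of A's for-loop: state = (current_section, added_items, fixed_items, changed_items)
def pvStepA : (Option String × List (List Char) × List (List Char) × List (List Char)) → List Char →
    (Option String × List (List Char) × List (List Char) × List (List Char))
  | (cur, a, f, c), line =>
    let s := PySem.Chars.strip line
    if PySem.Chars.startswith s pvHdrAdded then (some "added", a, f, c)
    else if PySem.Chars.startswith s pvHdrFixed then (some "fixed", a, f, c)
    else if PySem.Chars.startswith s pvHdrChanged then (some "changed", a, f, c)
    else if PySem.Chars.startswith s pvHdr then (none, a, f, c)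
    else if PySem.Chars.startswith s pvDash && cur.isSome then
      let item := PySem.Chars.strip (PySem.List.slice s (some 2) none)
      if cur == some "added" then (cur, a ++ [item], f, c)
      else if cur == some "fixed" then (cur, a, f ++ [item], c)
      else if cur == some "changed" then (cur, a, f, c ++ [item])
      else (cur, a, f, c)
    else (cur, a, f, c)

def create_email_summary (changelog : String) : String :=
  let lines := PySem.Chars.splitOn changelog.toList "\n".toList
  let st := lines.foldl pvStepA (none, [], [], [])
  let added_items := st.2.1
  let fixed_items := st.2.2.1
  let changed_items := st.2.2.2
  let summary_parts : List (List Char) := []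
  let summary_parts := if added_items.isEmpty then summary_parts else
    summary_parts ++ ["This month we've introduced ".toList ++ PySem.Int.toChars (added_items.length : Int) ++
      " new features and improvements to make CloudFix even more powerful for AWS cost optimization. Key additions include ".toList ++
      PySem.Chars.join ", ".toList (PySem.List.slice added_items none (some 2)) ++
      (if added_items.length > 2 then "...".toList else []) ++ ".".toList]
  let summary_parts := if fixed_items.isEmpty && changed_items.isEmpty then summary_parts else
    summary_parts ++ ["We've also made ".toList ++ PySem.Int.toChars ((fixed_items.length + changed_items.length : Nat) : Int) ++
      " enhancements and bug fixes based on your feedback, improving overall stability and performance.".toList]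
  let summary_parts := summary_parts ++
    ["These updates are automatically available in your CloudFix dashboard. Check out the full changelog below for complete details.".toList]
  String.ofList (PySem.Chars.join " ".toList summary_parts)

-- ===== PORT B =====
-- the '- ' items of one block body (lines already stripped)
def pvItemsOf (body : List (List Char)) : List (List Char) :=
  (body.filter (fun l => PySem.Chars.startswith l pvDash)).map
    (fun l => PySem.Chars.strip (PySem.List.slice l (some 2) none))

-- B's outer while-loop: peel off one header-delimited block per step
def pvCollect (a f c : List (List Char)) :
    List (List Char) → List (List Char) × List (List Char) × List (List Char)
  | [] => (a, f, c)
  | h :: t =>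
    let body := t.takeWhile (fun l => !PySem.Chars.startswith l pvHdr)
    let rest := t.dropWhile (fun l => !PySem.Chars.startswith l pvHdr)
    let items := pvItemsOf body
    if PySem.Chars.startswith h pvHdrAdded then pvCollect (a ++ items) f c rest
    else if PySem.Chars.startswith h pvHdrFixed then pvCollect a (f ++ items) c rest
    else if PySem.Chars.startswith h pvHdrChanged then pvCollect a f (c ++ items) rest
    else pvCollect a f c rest
  termination_by l => l.length
  decreasing_by
    all_goals
      simpa using Nat.lt_succ_of_le (List.length_dropWhile_le (fun l => !PySem.Chars.startswith l pvHdr) t)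

def create_email_summary_alt (changelog : String) : String :=
  let lines := (PySem.Chars.splitOn changelog.toList "\n".toList).map PySem.Chars.strip
  let acc := pvCollect [] [] [] lines
  let added_items := acc.1
  let fixed_items := acc.2.1
  let changed_items := acc.2.2
  let out := "These updates are automatically available in your CloudFix dashboard. Check out the full changelog below for complete details.".toList
  let out := if fixed_items.isEmpty && changed_items.isEmpty then out else
    ("We've also made ".toList ++ PySem.Int.toChars ((fixed_items.length + changed_items.length : Nat) : Int) ++
      " enhancements and bug fixes based on your feedback, improving overall stability and performance.".toList) ++ " ".toList ++ out
  let out := if added_items.isEmpty then out else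
    ("This month we've introduced ".toList ++ PySem.Int.toChars (added_items.length : Int) ++
      " new features and improvements to make CloudFix even more powerful for AWS cost optimization. Key additions include ".toList ++
      PySem.Chars.join ", ".toList (PySem.List.slice added_items none (some 2)) ++
      (if added_items.length > 2 then "...".toList else []) ++ ".".toList) ++ " ".toList ++ out
  String.ofList out

-- ===== PRECONDITION & SPEC =====
def Spec_create_email_summary (changelog : String) (out : String) : Prop := out = create_email_summary_alt changelog
instance (changelog : String) (out : String) : Decidable (Spec_create_email_summary changelog out) := by unfold Spec_create_email_summary; infer_instance

-- ===== CLAIM (what is proved, stated in full; the proofs are below) =====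
def Claim_equal_create_email_summary : Prop := ∀ (changelog : String), Dom_create_email_summary changelog → Spec_create_email_summary changelog (create_email_summary changelog)

-- ===== LEMMAS AND PROOFS =====

-- predicate abbreviation used by the proof lemmas
def pvNonHdr (l : List Char) : Bool := !PySem.Chars.startswith l pvHdr

theorem pvNonHdr_eta : (fun l : List Char => !PySem.Chars.startswith l pvHdr) = pvNonHdr := rfl

-- items that A's state machine credits to section `tag` while in state `cur`
def pvBucket (cur : Option String) (tag : String) (items : List (List Char)) : List (List Char) :=
  if cur == some tag then items else []

theorem pvStartswith_trans (s p q : List Char) (hpq : q <+: p)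
    (h : PySem.Chars.startswith s p = true) :
    PySem.Chars.startswith s q = true := by
  rw [PySem.Chars.startswith_iff] at *
  exact hpq.trans h

theorem pvNot_hdr_not_added (h : List Char) (hh : PySem.Chars.startswith h pvHdr = false) :
    PySem.Chars.startswith h pvHdrAdded = false := by
  rw [Bool.eq_false_iff]; intro hcon
  rw [pvStartswith_trans h pvHdrAdded pvHdr (by decide) hcon] at hh
  simp at hh

theorem pvNot_hdr_not_fixed (h : List Char) (hh : PySem.Chars.startswith h pvHdr = false) :
    PySem.Chars.startswith h pvHdrFixed = false := by
  rw [Bool.eq_false_iff]; intro hcon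
  rw [pvStartswith_trans h pvHdrFixed pvHdr (by decide) hcon] at hh
  simp at hh

theorem pvNot_hdr_not_changed (h : List Char) (hh : PySem.Chars.startswith h pvHdr = false) :
    PySem.Chars.startswith h pvHdrChanged = false := by
  rw [Bool.eq_false_iff]; intro hcon
  rw [pvStartswith_trans h pvHdrChanged pvHdr (by decide) hcon] at hh
  simp at hh

-- main invariant: A's fold from an arbitrary state equals B's block recursion,
-- once the not-yet-closed block prefix is credited to the current section
theorem pvLoop_eq (lines : List (List Char)) (cur : Option String) (a f c : List (List Char)) :
    (lines.foldl pvStepA (cur, a, f, c)).2 =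
      pvCollect
        (a ++ pvBucket cur "added" (pvItemsOf ((lines.map PySem.Chars.strip).takeWhile pvNonHdr)))
        (f ++ pvBucket cur "fixed" (pvItemsOf ((lines.map PySem.Chars.strip).takeWhile pvNonHdr)))
        (c ++ pvBucket cur "changed" (pvItemsOf ((lines.map PySem.Chars.strip).takeWhile pvNonHdr)))
        ((lines.map PySem.Chars.strip).dropWhile pvNonHdr) := by
  induction lines generalizing cur a f c with
  | nil => simp [pvBucket, pvItemsOf, pvCollect]
  | cons l t ih =>
    rw [List.foldl_cons, List.map_cons, List.takeWhile_cons, List.dropWhile_cons]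
    by_cases h1 : PySem.Chars.startswith (PySem.Chars.strip l) pvHdrAdded = true
    · have hhdr : PySem.Chars.startswith (PySem.Chars.strip l) pvHdr = true :=
        pvStartswith_trans _ _ _ (by decide) h1
      have hstep : pvStepA (cur, a, f, c) l = (some "added", a, f, c) := by
        simp [pvStepA, h1]
      rw [hstep, ih]
      simp [pvNonHdr_eta, pvNonHdr, hhdr, pvCollect, h1, pvBucket, pvItemsOf]
    · by_cases h2 : PySem.Chars.startswith (PySem.Chars.strip l) pvHdrFixed = true
      · have hhdr : PySem.Chars.startswith (PySem.Chars.strip l) pvHdr = true :=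
          pvStartswith_trans _ _ _ (by decide) h2
        have hstep : pvStepA (cur, a, f, c) l = (some "fixed", a, f, c) := by
          simp [pvStepA, h1, h2]
        rw [hstep, ih]
        simp [pvNonHdr_eta, pvNonHdr, hhdr, pvCollect, h1, h2, pvBucket, pvItemsOf]
      · by_cases h3 : PySem.Chars.startswith (PySem.Chars.strip l) pvHdrChanged = true
        · have hhdr : PySem.Chars.startswith (PySem.Chars.strip l) pvHdr = true :=
            pvStartswith_trans _ _ _ (by decide) h3
          have hstep : pvStepA (cur, a, f, c) l = (some "changed", a, f, c) := by
            simp [pvStepA, h1, h2, h3]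
          rw [hstep, ih]
          simp [pvNonHdr_eta, pvNonHdr, hhdr, pvCollect, h1, h2, h3, pvBucket, pvItemsOf]
        · by_cases h4 : PySem.Chars.startswith (PySem.Chars.strip l) pvHdr = true
          · have hstep : pvStepA (cur, a, f, c) l = (none, a, f, c) := by
              simp [pvStepA, h1, h2, h3, h4]
            rw [hstep, ih]
            simp [pvNonHdr_eta, pvNonHdr, h4, pvCollect, h1, h2, h3, pvBucket, pvItemsOf]
          · have h4' : PySem.Chars.startswith (PySem.Chars.strip l) pvHdr = false := by
              simpa using h4
            by_cases h5 : PySem.Chars.startswith (PySem.Chars.strip l) pvDash = true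
            · -- a '- ' line: goes to the bucket of the current section (if any)
              rcases cur with _ | v
              · have hstep : pvStepA (none, a, f, c) l = (none, a, f, c) := by
                  simp [pvStepA, h1, h2, h3, h4]
                rw [hstep, ih]
                simp [pvNonHdr, h4', pvBucket]
              · by_cases hv1 : v = "added"
                · subst hv1
                  have hstep : pvStepA (some "added", a, f, c) l =
                      (some "added", a ++ [PySem.Chars.strip (PySem.List.slice (PySem.Chars.strip l) (some 2) none)], f, c) := by
                    simp [pvStepA, h1, h2, h3, h4, h5]
                  rw [hstep, ih]
                  simp [pvNonHdr, h4', pvBucket, pvItemsOf, h5]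
                · by_cases hv2 : v = "fixed"
                  · subst hv2
                    have hstep : pvStepA (some "fixed", a, f, c) l =
                        (some "fixed", a, f ++ [PySem.Chars.strip (PySem.List.slice (PySem.Chars.strip l) (some 2) none)], c) := by
                      simp [pvStepA, h1, h2, h3, h4, h5]
                    rw [hstep, ih]
                    simp [pvNonHdr, h4', pvBucket, pvItemsOf, h5]
                  · by_cases hv3 : v = "changed"
                    · subst hv3
                      have hstep : pvStepA (some "changed", a, f, c) l =
                          (some "changed", a, f, c ++ [PySem.Chars.strip (PySem.List.slice (PySem.Chars.strip l) (some 2) none)]) := by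
                        simp [pvStepA, h1, h2, h3, h4, h5]
                      rw [hstep, ih]
                      simp [pvNonHdr, h4', pvBucket, pvItemsOf, h5]
                    · have hstep : pvStepA (some v, a, f, c) l = (some v, a, f, c) := by
                        simp [pvStepA, h1, h2, h3, h4, h5, hv1, hv2, hv3]
                      rw [hstep, ih]
                      simp [pvNonHdr, h4', pvBucket, hv1, hv2, hv3]
            · -- an ordinary line: contributes nothing on either side
              have hstep : pvStepA (cur, a, f, c) l = (cur, a, f, c) := by
                simp [pvStepA, h1, h2, h3, h4, h5]
              rw [hstep, ih]
              have h5' : PySem.Chars.startswith (PySem.Chars.strip l) pvDash = false := by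
                simpa using h5
              simp [pvNonHdr, h4', pvBucket, pvItemsOf, h5']

theorem pvCollect_dropWhile (a f c : List (List Char)) (lines : List (List Char)) :
    pvCollect a f c lines = pvCollect a f c (lines.dropWhile pvNonHdr) := by
  cases lines with
  | nil => rfl
  | cons h t =>
    rw [List.dropWhile_cons]
    by_cases hh : PySem.Chars.startswith h pvHdr = true
    · simp [pvNonHdr, hh]
    · have hh' : PySem.Chars.startswith h pvHdr = false := by simpa using hh
      simp [pvCollect, pvNot_hdr_not_added h hh', pvNot_hdr_not_fixed h hh',
        pvNot_hdr_not_changed h hh', pvNonHdr_eta, pvNonHdr, hh']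

-- ===== VERDICT (by name: the statement is the Claim_ definition above) =====
theorem create_email_summary_spec : Claim_equal_create_email_summary := by
  intro changelog _
  unfold Spec_create_email_summary
  simp only [create_email_summary, create_email_summary_alt]
  have hext : (((PySem.Chars.splitOn changelog.toList "\n".toList).foldl pvStepA (none, [], [], []))).2 =
      pvCollect [] [] [] ((PySem.Chars.splitOn changelog.toList "\n".toList).map PySem.Chars.strip) := by
    rw [pvLoop_eq]
    simp [pvBucket]
    exact (pvCollect_dropWhile [] [] [] _).symm
  rw [hext]
  obtain ⟨A, F, C⟩ := pvCollect [] [] [] ((PySem.Chars.splitOn changelog.toList "\n".toList).map PySem.Chars.strip)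
  by_cases hA : A.isEmpty
  · by_cases hFC : F.isEmpty && C.isEmpty
    · simp [hA, hFC, PySem.Chars.join_singleton]
    · simp [hA, hFC, PySem.Chars.join_cons_cons, PySem.Chars.join_singleton, List.append_assoc]
  · by_cases hFC : F.isEmpty && C.isEmpty
    · simp [hA, hFC, PySem.Chars.join_cons_cons, PySem.Chars.join_singleton, List.append_assoc]
    · simp [hA, hFC, PySem.Chars.join_cons_cons, PySem.Chars.join_singleton, List.append_assoc]
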